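-- pv_equiv track=rewrite | github.com/numworks/epsilon | build/utilities/translate.py | need_to_be_translated
-- ===== SOURCE A (Python) =====
-- def need_to_be_translated(keys: dict[str, list[list[str]]])\
--                           -> dict[str, list[list[str]]]:
--     """Return the key that needs to be translated by locale.
--
--     Args:
--         keys (dict[str, list[str]]): The keys of the i18n files
--
--     Returns:
--         dict[str, list[str]]: The keys that needs to be translated,
--                               sorted by locale
--
--     """
--     # Initialize the list of keys
--     keys_list: list[list[str]] = []
--     keys_to_translate: dict[str, list[list[str]]] = {}
--     # Iterate over all locales
--     for value_ in keys.values():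
--         # Iterate on keys of the locale
--         for key in value_:
--             # Skip if the key is already in the list
--             if key[0] in keys_list:
--                 continue
--             # Else add the key to the list
--             keys_list.append(key)
--     for locale, value in keys.items():
--         # Initialize the list of keys in the locale
--         keys_in_locale: list[str] = [i[0] for i in value]
--         # Get the keys of keys that need to be translated
--         keys_to_translate_in_locale: list[list[str]] = [
--             key for key in keys_list if key[0] not in keys_in_locale
--         ]
--         # Remove duplicates from the list
--         # Initialize the deduplicated list
--         keys_to_translate_in_locale_deduplicated: list[list[str]] = []
--         # Iterate over the duplicated list
--         for item in keys_to_translate_in_locale: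
--             # If the key is not in the deduplicated list, add it
--             if item not in keys_to_translate_in_locale_deduplicated:
--                 keys_to_translate_in_locale_deduplicated.append(item)
--             # Else, ignore the key, because it is already in the list
--         # Save the deduplicated list into the dictionary
--         keys_to_translate[locale] = keys_to_translate_in_locale_deduplicated
--     return keys_to_translate
-- ===== SOURCE B (Python) =====
-- def need_to_be_translated(keys: dict[str, list[list[str]]]) \
--                           -> dict[str, list[list[str]]]:
--     """Return the keys that need to be translated, by locale."""
--     # One global dedup pass over all locales' keys (first occurrence of each full key wins).
--     all_keys: list[list[str]] = []
--     seen: set[tuple[str, ...]] = set()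
--     for value in keys.values():
--         for key in value:
--             t = tuple(key)
--             if t not in seen:
--                 seen.add(t)
--                 all_keys.append(key)
--     # Per locale: keep the keys whose name is absent from that locale.
--     result: dict[str, list[list[str]]] = {}
--     for locale, value in keys.items():
--         firsts = {i[0] for i in value}
--         result[locale] = [k for k in all_keys if k[0] not in firsts]
--     return result
-- ===== Notes on version B (the rewrite author's own statement) =====
-- stated objective: faster
-- what changed: B deduplicates all locales' keys once globally with a seen-set (A's global dedup test compares a str to lists and never fires, so its list holds every key with duplicates) and then does a plain per-locale filter against a set of the locale's key names, instead of A's per-locale filter followed by a quadratic list-membership dedup loop.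
import Mathlib
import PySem

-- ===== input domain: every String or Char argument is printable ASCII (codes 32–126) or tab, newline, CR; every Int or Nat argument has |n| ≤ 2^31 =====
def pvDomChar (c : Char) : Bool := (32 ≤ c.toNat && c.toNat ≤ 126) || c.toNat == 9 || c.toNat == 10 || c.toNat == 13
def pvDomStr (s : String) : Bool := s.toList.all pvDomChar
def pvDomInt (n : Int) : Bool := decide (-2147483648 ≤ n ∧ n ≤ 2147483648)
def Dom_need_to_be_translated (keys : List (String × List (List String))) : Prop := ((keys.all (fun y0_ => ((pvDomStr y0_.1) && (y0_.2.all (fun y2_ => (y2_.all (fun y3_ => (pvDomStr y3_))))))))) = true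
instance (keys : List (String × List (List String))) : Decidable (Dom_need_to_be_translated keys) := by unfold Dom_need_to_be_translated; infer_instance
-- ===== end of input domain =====

-- B replaces A's per-locale filter-then-dedup (with A's broken global dedup test) by one global
-- dedup pass over all keys followed by a plain per-locale filter; objective: faster, simpler.

-- ===== PORT A =====
-- key[0]  (total under Pre_: every key list is nonempty)
def pyHead (key : List String) : String := (PySem.List.pyGet? key 0).getD ""

-- Python's 'key[0] in keys_list' tests a str against list elements; 'str == list' is always
-- False in Python, so the elementwise comparison is ported as this constant-false function (exact).
def pyStrEqStrList (_s : String) (_x : List String) : Bool := false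

def need_to_be_translated (keys : List (String × List (List String))) : List (String × List (List String)) :=
  let keys_list : List (List String) :=
    keys.foldl (fun kl value_ =>
      value_.2.foldl (fun kl key =>
        if kl.any (fun item => pyStrEqStrList (pyHead key) item) then kl else kl ++ [key]) kl) []
  keys.foldl (fun acc lv =>
    let keys_in_locale : List String := lv.2.map (fun i => pyHead i)
    let keys_to_translate_in_locale : List (List String) :=
      keys_list.filter (fun key => !(keys_in_locale.contains (pyHead key)))
    let dedup : List (List String) :=
      keys_to_translate_in_locale.foldl (fun d item => if d.contains item then d else d ++ [item]) []
    acc ++ [(lv.1, dedup)]) []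

-- ===== PORT B =====
def need_to_be_translated_alt (keys : List (String × List (List String))) : List (String × List (List String)) :=
  let all_keys : List (List String) :=
    (keys.foldl (fun (st : PySem.Set (List String) × List (List String)) value =>
        value.2.foldl (fun st key =>
          if PySem.Set.contains st.1 key then st else (PySem.Set.add st.1 key, st.2 ++ [key])) st)
      (PySem.Set.empty, [])).2
  keys.map (fun lv =>
    let firsts : PySem.Set String := PySem.Set.ofList (lv.2.map (fun i => pyHead i))
    (lv.1, all_keys.filter (fun k => !(PySem.Set.contains firsts (pyHead k)))))

-- ===== PRECONDITION & SPEC =====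
-- Pre_ excludes inputs with an empty key list (Python A raises IndexError on key[0]) and
-- association lists with duplicate locale names (they do not represent a Python dict input).
def Pre_need_to_be_translated (keys : List (String × List (List String))) : Prop :=
  (∀ p ∈ keys, ∀ k ∈ p.2, k ≠ []) ∧ (keys.map Prod.fst).Nodup
instance (keys : List (String × List (List String))) : Decidable (Pre_need_to_be_translated keys) := by unfold Pre_need_to_be_translated; infer_instance

def pvWitness_need_to_be_translated : (List (String × List (List String))) :=
  [("en", [["home", "Home"], ["back", "Back"]]), ("fr", [["home", "Accueil"]])]

def Spec_need_to_be_translated (keys : List (String × List (List String))) (out : List (String × List (List String))) : Prop := out = need_to_be_translated_alt keys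
instance (keys : List (String × List (List String))) (out : List (String × List (List String))) : Decidable (Spec_need_to_be_translated keys out) := by unfold Spec_need_to_be_translated; infer_instance

-- ===== CLAIM (what is proved, stated in full; the proofs are below) =====
def Claim_equal_need_to_be_translated : Prop := ∀ (keys : List (String × List (List String))), Dom_need_to_be_translated keys → Pre_need_to_be_translated keys → Spec_need_to_be_translated keys (need_to_be_translated keys)

-- ===== LEMMAS AND PROOFS =====

-- A's global loop: the membership test is constantly false, so it just concatenates all keys.
theorem lemA_concat (l : List (List String)) (kl : List (List String)) :
    l.foldl (fun kl key =>
      if kl.any (fun item => pyStrEqStrList (pyHead key) item) then kl else kl ++ [key]) kl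
      = kl ++ l := by
  induction l generalizing kl with
  | nil => simp
  | cons x xs ih =>
      rw [List.foldl_cons, if_neg (by simp [pyStrEqStrList]), ih, List.append_assoc]
      rfl

theorem lemA_flat (keys : List (String × List (List String))) (kl : List (List String)) :
    keys.foldl (fun kl value_ =>
      value_.2.foldl (fun kl key =>
        if kl.any (fun item => pyStrEqStrList (pyHead key) item) then kl else kl ++ [key]) kl) kl
      = kl ++ keys.flatMap (fun v => v.2) := by
  induction keys generalizing kl with
  | nil => simp
  | cons x xs ih =>
      rw [List.foldl_cons, lemA_concat, ih, List.flatMap_cons, List.append_assoc]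

-- A's dedup loop is exactly PySem.Set.update (Set.add element by element).
theorem lemA_dedup (l : List (List String)) (d : List (List String)) :
    l.foldl (fun d item => if d.contains item then d else d ++ [item]) d = PySem.Set.update d l := by
  induction l generalizing d with
  | nil => rfl
  | cons x xs ih =>
      rw [List.foldl_cons, PySem.Set.update_cons]
      by_cases h : x ∈ d
      · rw [if_pos (by simpa using h), PySem.Set.add_of_mem h, ih]
      · rw [if_neg (by simpa using h), PySem.Set.add_of_not_mem h, ih]

-- A's output loop: appending one pair per input pair is List.map.
theorem lemA_map (f : String × List (List String) → String × List (List String))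
    (keys : List (String × List (List String))) (acc : List (String × List (List String))) :
    keys.foldl (fun acc lv => acc ++ [f lv]) acc = acc ++ keys.map f := by
  induction keys generalizing acc with
  | nil => simp
  | cons x xs ih => rw [List.foldl_cons, ih, List.map_cons, List.append_assoc]; rfl

-- B's global loop keeps the seen-set and the output list identical (both grow by Set.add).
theorem lemB_diag (l : List (List String)) (s : PySem.Set (List String)) :
    l.foldl (fun (st : PySem.Set (List String) × List (List String)) key =>
        if PySem.Set.contains st.1 key then st else (PySem.Set.add st.1 key, st.2 ++ [key])) (s, s)
      = (PySem.Set.update s l, PySem.Set.update s l) := by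
  induction l generalizing s with
  | nil => rfl
  | cons x xs ih =>
      rw [List.foldl_cons, PySem.Set.update_cons]
      by_cases h : x ∈ s
      · simp only [PySem.Set.add_of_mem h]
        rw [if_pos ((PySem.Set.contains_iff s x).2 h)]
        exact ih s
      · simp only [PySem.Set.add_of_not_mem h]
        rw [if_neg (fun hc => h ((PySem.Set.contains_iff s x).1 hc))]
        exact ih (s ++ [x])

theorem lemB_flat (keys : List (String × List (List String))) (s : PySem.Set (List String)) :
    keys.foldl (fun (st : PySem.Set (List String) × List (List String)) value =>
        value.2.foldl (fun st key =>
          if PySem.Set.contains st.1 key then st else (PySem.Set.add st.1 key, st.2 ++ [key])) st) (s, s)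
      = (PySem.Set.update s (keys.flatMap (fun v => v.2)),
         PySem.Set.update s (keys.flatMap (fun v => v.2))) := by
  induction keys generalizing s with
  | nil => rfl
  | cons x xs ih =>
      rw [List.foldl_cons, lemB_diag, ih, List.flatMap_cons, PySem.Set.update_append]

-- B's global loop from the empty state produces exactly set-dedup of all keys.
theorem lemB_main (keys : List (String × List (List String))) :
    (keys.foldl (fun (st : PySem.Set (List String) × List (List String)) value =>
        value.2.foldl (fun st key =>
          if PySem.Set.contains st.1 key then st else (PySem.Set.add st.1 key, st.2 ++ [key])) st)
      (PySem.Set.empty, [])).2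
      = PySem.Set.ofList (keys.flatMap (fun v => v.2)) := by
  have h := lemB_flat keys []
  rw [PySem.Set.update_nil_left] at h
  exact congrArg Prod.snd h

-- contains on an ofList set agrees with list membership.
theorem contains_ofList {α : Type} [BEq α] [LawfulBEq α] (xs : List α) (y : α) :
    PySem.Set.contains (PySem.Set.ofList xs) y = xs.contains y := by
  by_cases h : y ∈ xs
  · rw [(PySem.Set.contains_iff _ _).2 ((PySem.Set.mem_ofList _ _).2 h)]
    simp [h]
  · have hm : ¬ y ∈ PySem.Set.ofList xs := fun hm => h ((PySem.Set.mem_ofList _ _).1 hm)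
    cases hc : PySem.Set.contains (PySem.Set.ofList xs) y with
    | false => simp [h]
    | true => exact absurd ((PySem.Set.contains_iff _ _).1 hc) hm

-- set-dedup commutes with a pointwise filter.
theorem ofList_filter {α : Type} [BEq α] [LawfulBEq α] (p : α → Bool) (l : List α) :
    PySem.Set.ofList (l.filter p) = (PySem.Set.ofList l).filter p := by
  induction l with
  | nil => rfl
  | cons x xs ih =>
      by_cases h : p x = true
      · rw [List.filter_cons_of_pos h, PySem.Set.ofList_cons, PySem.Set.ofList_cons,
            List.filter_cons_of_pos h, ih]
        simp [PySem.Set.discard, List.filter_filter, Bool.and_comm]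
      · rw [List.filter_cons_of_neg (by simp_all), PySem.Set.ofList_cons,
            List.filter_cons_of_neg (by simp_all), ih, PySem.Set.discard, List.filter_filter]
        congr 1
        funext y
        by_cases hyx : y = x <;> simp [hyx, h]

-- ===== VERDICT (by name: the statement is the Claim_ definition above) =====
theorem need_to_be_translated_spec : Claim_equal_need_to_be_translated := by
  intro keys _ _
  unfold Spec_need_to_be_translated need_to_be_translated need_to_be_translated_alt
  simp only [lemA_flat, lemB_main, List.nil_append]
  rw [lemA_map]
  rw [List.nil_append]
  apply List.map_congr_left
  intro lv _
  refine congrArg (fun z => (lv.1, z)) ?_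
  rw [lemA_dedup, PySem.Set.update_nil_left, ofList_filter]
  apply List.filter_congr
  intro k _
  rw [contains_ofList]
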